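-- pv_equiv track=rewrite | github.com/demisto/content | Packs/AsBuiltGeneration/Scripts/AsBuiltGeneration/AsBuiltGeneration.py | separate_classfier_mapper
-- ===== SOURCE A (Python) =====
-- def separate_classfier_mapper(data):
--     """
--     This function accepts the raw data and filters out classifer and mappers from it.
--
--     Args:
--     data: raw data to be filtered (can be list or dict)
--
--     Returns:
--     list : classifier data list
--     list: incoming mapper data list
--     list: outgoing mapper data list
--
--     """
--
--     c = []
--     i_m = []
--     o_m = []
--
--     for data_item in data:
--         if data_item["type"] == "mapping-outgoing":
--             o_m.append(data_item)
--         elif data_item["type"] == "mapping-incoming":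
--             i_m.append(data_item)
--         else:
--             c.append(data_item)
--     return c, i_m, o_m
-- ===== SOURCE B (Python) =====
-- def separate_classfier_mapper(data):
--     """
--     This function accepts the raw data and filters out classifer and mappers from it.
--
--     Args:
--     data: raw data to be filtered (can be list or dict)
--
--     Returns:
--     list : classifier data list
--     list: incoming mapper data list
--     list: outgoing mapper data list
--
--     """
--     rank = {"mapping-outgoing": 2, "mapping-incoming": 1}
--     # stable sort groups the items by bucket rank while preserving input order
--     items = sorted(data, key=lambda d: rank.get(d["type"], 0))
--     n0 = sum(1 for d in data if rank.get(d["type"], 0) == 0)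
--     n1 = sum(1 for d in data if rank.get(d["type"], 0) == 1)
--     return items[:n0], items[n0:n0 + n1], items[n0 + n1:]
-- ===== Notes on version B (the rewrite author's own statement) =====
-- stated objective: alternative
-- what changed: Replaces the single if/elif/else accumulator loop by a stable sort on a bucket rank (classifier=0, incoming=1, outgoing=2) followed by slicing the sorted list at the bucket counts; stability of sort preserves A's per-bucket order.
import Mathlib
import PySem

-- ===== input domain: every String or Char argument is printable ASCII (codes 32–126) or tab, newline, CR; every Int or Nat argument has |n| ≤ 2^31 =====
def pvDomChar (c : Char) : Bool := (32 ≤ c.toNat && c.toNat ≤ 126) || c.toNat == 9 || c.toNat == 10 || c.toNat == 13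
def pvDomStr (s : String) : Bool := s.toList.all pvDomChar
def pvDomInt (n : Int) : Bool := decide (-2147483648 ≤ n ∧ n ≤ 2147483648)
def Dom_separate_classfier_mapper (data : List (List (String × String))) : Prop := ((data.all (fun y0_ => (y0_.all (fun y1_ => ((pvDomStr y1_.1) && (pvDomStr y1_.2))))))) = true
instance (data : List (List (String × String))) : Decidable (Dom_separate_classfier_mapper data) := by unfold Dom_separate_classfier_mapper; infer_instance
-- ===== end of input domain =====

-- B replaces A's single if/elif/else accumulator loop by a stable sort on a bucket rank plus count-based slicing (alternative algorithm, not faster; return values only).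

-- ===== PORT A =====
-- d["type"]; under Pre_ the key is present, so the default "" is never the looked-up value's source
def pvTypeOf (d : List (String × String)) : String :=
  (((d.find? (fun p => p.1 == "type")).map Prod.snd).getD "")

-- the for-loop of A: accumulators c, i_m, o_m, appended at the back, branches in A's order
def pvLoopA (c i_m o_m : List (List (String × String))) :
    List (List (String × String)) →
    (List (List (String × String))) × (List (List (String × String))) × (List (List (String × String)))
  | [] => (c, i_m, o_m)
  | d :: rest =>
    if pvTypeOf d = "mapping-outgoing" then pvLoopA c i_m (o_m ++ [d]) rest
    else if pvTypeOf d = "mapping-incoming" then pvLoopA c (i_m ++ [d]) o_m rest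
    else pvLoopA (c ++ [d]) i_m o_m rest

def separate_classfier_mapper (data : List (List (String × String))) :
    (List (List (String × String))) × (List (List (String × String))) × (List (List (String × String))) :=
  pvLoopA [] [] [] data

-- ===== PORT B =====
-- rank.get(d["type"], 0) with rank = {"mapping-outgoing": 2, "mapping-incoming": 1}
def pvRank (d : List (String × String)) : Int :=
  PySem.Dict.getD (PySem.Dict.ofList [("mapping-outgoing", (2 : Int)), ("mapping-incoming", (1 : Int))]) (pvTypeOf d) 0

def separate_classfier_mapper_alt (data : List (List (String × String))) :
    (List (List (String × String))) × (List (List (String × String))) × (List (List (String × String))) :=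
  let items := PySem.List.sorted data pvRank
  let n0 := data.countP (fun d => pvRank d == 0)
  let n1 := data.countP (fun d => pvRank d == 1)
  (PySem.List.slice items none (some (n0 : Int)),
   PySem.List.slice items (some (n0 : Int)) (some ((n0 : Int) + (n1 : Int))),
   PySem.List.slice items (some ((n0 : Int) + (n1 : Int))) none)

-- ===== PRECONDITION & SPEC =====
-- Pre_ excludes items lacking a "type" key: there Python A (and B) raise KeyError.
def Pre_separate_classfier_mapper (data : List (List (String × String))) : Prop :=
  ∀ d ∈ data, "type" ∈ d.map Prod.fst
instance (data : List (List (String × String))) : Decidable (Pre_separate_classfier_mapper data) := by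
  unfold Pre_separate_classfier_mapper; infer_instance

def pvWitness_separate_classfier_mapper : (List (List (String × String))) :=
  [[("type", "mapping-incoming")], [("type", "classifier"), ("id", "1")]]

def Spec_separate_classfier_mapper (data : List (List (String × String))) (out : (List (List (String × String))) × (List (List (String × String))) × (List (List (String × String)))) : Prop := out = separate_classfier_mapper_alt data
instance (data : List (List (String × String))) (out : (List (List (String × String))) × (List (List (String × String))) × (List (List (String × String)))) : Decidable (Spec_separate_classfier_mapper data out) := by unfold Spec_separate_classfier_mapper; infer_instance

-- ===== CLAIM (what is proved, stated in full; the proofs are below) =====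
def Claim_equal_separate_classfier_mapper : Prop := ∀ (data : List (List (String × String))), Dom_separate_classfier_mapper data → Pre_separate_classfier_mapper data → Spec_separate_classfier_mapper data (separate_classfier_mapper data)

-- ===== LEMMAS AND PROOFS =====

theorem pvRank_eq (d : List (String × String)) :
    pvRank d = if pvTypeOf d = "mapping-outgoing" then 2
               else if pvTypeOf d = "mapping-incoming" then 1 else 0 := by
  have key : ∀ s : String, PySem.Dict.getD (PySem.Dict.ofList [("mapping-outgoing", (2 : Int)), ("mapping-incoming", (1 : Int))]) s 0
      = if s = "mapping-outgoing" then 2 else if s = "mapping-incoming" then 1 else 0 := by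
    intro s
    by_cases h1 : s = "mapping-outgoing"
    · subst h1; decide
    by_cases h2 : s = "mapping-incoming"
    · subst h2; decide
    have b1 : (("mapping-outgoing" : String) == s) = false := by
      simp only [beq_eq_false_iff_ne, ne_eq]; exact fun h => h1 h.symm
    have b2 : (("mapping-incoming" : String) == s) = false := by
      simp only [beq_eq_false_iff_ne, ne_eq]; exact fun h => h2 h.symm
    simp [PySem.Dict.getD, PySem.Dict.ofList, PySem.Dict.update, PySem.Dict.insert,
      PySem.Dict.empty, PySem.Dict.get?, b1, b2, h1, h2]
  rw [pvRank, key]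

theorem pvRank_mem (d : List (String × String)) :
    pvRank d = 0 ∨ pvRank d = 1 ∨ pvRank d = 2 := by
  rw [pvRank_eq]; split_ifs <;> simp

-- A's loop computes the three filters of the input
theorem pvLoopA_eq (data : List (List (String × String)))
    (c i_m o_m : List (List (String × String))) :
    pvLoopA c i_m o_m data =
      (c ++ data.filter (fun d => pvRank d == 0),
       i_m ++ data.filter (fun d => pvRank d == 1),
       o_m ++ data.filter (fun d => pvRank d == 2)) := by
  induction data generalizing c i_m o_m with
  | nil => simp [pvLoopA]
  | cons d rest ih =>
    by_cases ho : pvTypeOf d = "mapping-outgoing" <;>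
      by_cases hi : pvTypeOf d = "mapping-incoming" <;>
      simp [pvLoopA, ho, hi, ih, pvRank_eq]

-- inserting past a prefix none of whose elements x must go before
theorem insertBy_append {α : Type} (before : α → α → Bool) (x : α)
    (ys zs : List α) (h : ∀ y ∈ ys, before x y = false) :
    PySem.List.insertBy before x (ys ++ zs) = ys ++ PySem.List.insertBy before x zs := by
  induction ys with
  | nil => simp
  | cons y t ih =>
    have hy := h y (by simp)
    simp [PySem.List.insertBy, hy]
    exact ih (fun z hz => h z (by simp [hz]))

-- inserting before a list all of whose elements x must go before
theorem insertBy_cons_all {α : Type} (before : α → α → Bool) (x : α)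
    (zs : List α) (h : ∀ y ∈ zs, before x y = true) :
    PySem.List.insertBy before x zs = x :: zs := by
  cases zs with
  | nil => simp [PySem.List.insertBy]
  | cons y t => simp [PySem.List.insertBy, h y (by simp)]

-- stable insertion sort on a 3-valued rank is the concatenation of the three filters
theorem sorted_rank_eq (data : List (List (String × String))) :
    PySem.List.sorted data pvRank =
      data.filter (fun d => pvRank d == 0) ++
      data.filter (fun d => pvRank d == 1) ++
      data.filter (fun d => pvRank d == 2) := by
  rw [PySem.List.sorted_eq_foldl_insertBy]
  suffices h : ∀ (xs A0 A1 A2 : List (List (String × String))),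
      (∀ a ∈ A0, pvRank a = 0) → (∀ a ∈ A1, pvRank a = 1) → (∀ a ∈ A2, pvRank a = 2) →
      xs.foldl (fun acc x => PySem.List.insertBy (fun a b => decide (pvRank a < pvRank b)) x acc)
          (A0 ++ A1 ++ A2) =
        (A0 ++ xs.filter (fun d => pvRank d == 0)) ++
        (A1 ++ xs.filter (fun d => pvRank d == 1)) ++
        (A2 ++ xs.filter (fun d => pvRank d == 2)) by
    simpa using h data [] [] [] (by simp) (by simp) (by simp)
  intro xs
  induction xs with
  | nil => intro A0 A1 A2 _ _ _; simp
  | cons x t ih =>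
    intro A0 A1 A2 h0 h1 h2
    rcases pvRank_mem x with hx | hx | hx
    · have step : PySem.List.insertBy (fun a b => decide (pvRank a < pvRank b)) x (A0 ++ A1 ++ A2)
          = (A0 ++ [x]) ++ A1 ++ A2 := by
        rw [List.append_assoc,
          insertBy_append _ x A0 (A1 ++ A2) (by intro y hy; simp [h0 y hy, hx]),
          insertBy_cons_all _ x (A1 ++ A2) (by
            intro y hy; rcases List.mem_append.1 hy with h | h
            · simp [h1 y h, hx]
            · simp [h2 y h, hx])]
        simp
      simp only [List.foldl_cons, step]
      rw [ih (A0 ++ [x]) A1 A2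
        (by intro a ha; rcases List.mem_append.1 ha with h | h
            · exact h0 a h
            · simp at h; simpa [h] using hx) h1 h2]
      simp [hx]
    · have step : PySem.List.insertBy (fun a b => decide (pvRank a < pvRank b)) x (A0 ++ A1 ++ A2)
          = A0 ++ (A1 ++ [x]) ++ A2 := by
        rw [insertBy_append _ x (A0 ++ A1) A2 (by
            intro y hy; rcases List.mem_append.1 hy with h | h
            · simp [h0 y h, hx]
            · simp [h1 y h, hx]),
          insertBy_cons_all _ x A2 (by intro y hy; simp [h2 y hy, hx])]
        simp
      simp only [List.foldl_cons, step]
      rw [ih A0 (A1 ++ [x]) A2 h0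
        (by intro a ha; rcases List.mem_append.1 ha with h | h
            · exact h1 a h
            · simp at h; simpa [h] using hx) h2]
      simp [hx]
    · have step : PySem.List.insertBy (fun a b => decide (pvRank a < pvRank b)) x (A0 ++ A1 ++ A2)
          = A0 ++ A1 ++ (A2 ++ [x]) := by
        rw [PySem.List.insertBy_of_forall_not_before _ x (A0 ++ A1 ++ A2) (by
            intro y hy
            rcases List.mem_append.1 hy with h | h
            · rcases List.mem_append.1 h with h' | h'
              · simp [h0 y h', hx]
              · simp [h1 y h', hx]
            · simp [h2 y h, hx])]
        simp
      simp only [List.foldl_cons, step]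
      rw [ih A0 A1 (A2 ++ [x]) h0 h1
        (by intro a ha; rcases List.mem_append.1 ha with h | h
            · exact h2 a h
            · simp at h; simpa [h] using hx)]
      simp [hx]

-- ===== VERDICT (by name: the statement is the Claim_ definition above) =====
theorem separate_classfier_mapper_spec : Claim_equal_separate_classfier_mapper := by
  intro data _ _
  unfold Spec_separate_classfier_mapper separate_classfier_mapper separate_classfier_mapper_alt
  rw [pvLoopA_eq]
  simp only [sorted_rank_eq, List.nil_append]
  have hn0 : data.countP (fun d => pvRank d == 0)
      = (data.filter (fun d => pvRank d == 0)).length := List.countP_eq_length_filter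
  have hn1 : data.countP (fun d => pvRank d == 1)
      = (data.filter (fun d => pvRank d == 1)).length := List.countP_eq_length_filter
  rw [hn0, hn1, ← Nat.cast_add, PySem.List.slice_to_natCast, PySem.List.slice_natCast,
    PySem.List.slice_from_natCast]
  simp only [Prod.mk.injEq]
  refine ⟨?_, ?_, ?_⟩
  · rw [List.append_assoc, List.take_left]
  · rw [List.append_assoc, List.drop_left, Nat.add_sub_cancel_left, List.take_left]
  · rw [List.drop_left' (by simp)]
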